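-- pv_equiv track=rewrite | github.com/981377660LMT/algorithm-study | 17_模式匹配/kmp/n个子串的最长公共前缀.py | solve
-- ===== SOURCE A (Python) =====
-- def solve(s: str, k: int) -> int:
--     def check(mid: int) -> bool:
--         pre = s[:mid]
--         count = s.split(pre)
--         return len(count) >= k + 1
--
--     def check2(mid: int) -> bool:
--         """可以用z函数加前缀和预处理达到O(1)check"""
--         ...
--
--     left, right = 1, len(s) + 5
--     while left <= right:
--         mid = (left + right) // 2
--         if check(mid):
--             left = mid + 1
--         else:
--             right = mid - 1
--     return right
-- ===== SOURCE B (Python) =====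
-- def solve(s: str, k: int) -> int:
--     # Linear downward scan over candidate prefix lengths; counts greedy
--     # non-overlapping occurrences by walking the string, instead of
--     # binary search over a split-based check.
--     n = len(s)
--     for mid in range(n + 5, 0, -1):
--         pre = s[:mid]
--         cnt = 0
--         rest = s
--         while rest:
--             if rest.startswith(pre):
--                 cnt += 1
--                 rest = rest[len(pre):]
--             else:
--                 rest = rest[1:]
--         if cnt >= k:
--             return mid
--     return 0
-- ===== Notes on version B (the rewrite author's own statement) =====
-- stated objective: alternative
-- what changed: Replaced the binary search with a split-based occurrence check by a direct downward linear scan over candidate prefix lengths that counts non-overlapping occurrences with an explicit startswith/advance walk over the string.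
-- outside the precondition, e.g. on solve('', 2): A raises ValueError, B returns 0
import Mathlib
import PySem

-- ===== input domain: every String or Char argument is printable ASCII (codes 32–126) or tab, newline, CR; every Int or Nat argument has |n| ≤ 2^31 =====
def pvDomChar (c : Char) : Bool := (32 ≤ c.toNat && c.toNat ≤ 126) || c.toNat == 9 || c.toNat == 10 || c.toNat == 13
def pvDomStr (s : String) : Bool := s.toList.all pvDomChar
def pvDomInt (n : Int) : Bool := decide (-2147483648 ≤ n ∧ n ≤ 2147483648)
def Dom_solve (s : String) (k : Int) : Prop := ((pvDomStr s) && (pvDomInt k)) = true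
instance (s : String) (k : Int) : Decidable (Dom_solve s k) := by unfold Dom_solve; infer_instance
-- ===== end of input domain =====

-- B replaces A's binary search over a split-based check by a direct downward
-- linear scan over candidate prefix lengths with an explicit occurrence-counting
-- walk (alternative decomposition, not claimed faster).

-- ===== PORT A =====
-- check(mid): pre = s[:mid]; count = s.split(pre); return len(count) >= k + 1
-- (s.split("") raises ValueError; Pre_solve excludes s = "", so the .getD []
--  default of the port is never reached on admitted inputs)
def checkA (s : String) (k : Int) (mid : Int) : Bool :=
  decide (k + 1 ≤ (((PySem.Str.split? s (PySem.Str.slice s none (some mid))).getD []).length : Int))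

-- while left <= right: mid = (left+right)//2; if check(mid): left = mid+1 else right = mid-1
def solveGo (s : String) (k : Int) (left right : Int) : Int :=
  if h : left ≤ right then
    let mid := PySem.Int.floordiv (left + right) 2
    if checkA s k mid then solveGo s k (mid + 1) right
    else solveGo s k left (mid - 1)
  else right
termination_by (right + 1 - left).toNat
decreasing_by
  · have := PySem.Int.floordiv_two_mid_bounds h; omega
  · have := PySem.Int.floordiv_two_mid_bounds h; omega

def solve (s : String) (k : Int) : Int :=
  solveGo s k 1 (PySem.Str.len s + 5)

-- ===== PORT B =====
-- the 'while rest:' loop of B: count non-overlapping occurrences of pre by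
-- walking rest (rest.startswith(pre) → skip len(pre) chars, else → skip one).
-- fuel is a totality device only: started at len(s)+1 it never runs out on
-- admitted inputs, since then pre ≠ [] and each iteration shortens rest.
def countGo (pre : List Char) : Nat → List Char → Nat
  | 0, _ => 0
  | _ + 1, [] => 0
  | fuel + 1, c :: rest =>
    if PySem.Chars.startswith (c :: rest) pre then
      1 + countGo pre fuel (List.drop pre.length (c :: rest))  -- rest = rest[len(pre):]
    else countGo pre fuel rest                                 -- rest = rest[1:]

-- the loop body for one candidate mid: 'cnt >= k' with pre = s[:mid]
def checkB (s : String) (k : Int) (mid : Nat) : Bool :=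
  decide (k ≤ (countGo (s.toList.take mid) (s.toList.length + 1) s.toList : Int))

-- for mid in range(n + 5, 0, -1): if cnt >= k: return mid   /   return 0
def scanGo (s : String) (k : Int) : Nat → Int
  | 0 => 0
  | m + 1 => if checkB s k (m + 1) then ((m + 1 : Nat) : Int) else scanGo s k m

def solve_alt (s : String) (k : Int) : Int :=
  scanGo s k (s.toList.length + 5)

-- ===== PRECONDITION & SPEC =====
-- Pre_ excludes exactly s = "", where A raises ValueError ('empty separator').
def Pre_solve (s : String) (k : Int) : Prop := s.toList ≠ []
instance (s : String) (k : Int) : Decidable (Pre_solve s k) := by unfold Pre_solve; infer_instance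
def pvWitness_solve : String × Int := ("abab", 2)

def Spec_solve (s : String) (k : Int) (out : Int) : Prop := out = solve_alt s k
instance (s : String) (k : Int) (out : Int) : Decidable (Spec_solve s k out) := by unfold Spec_solve; infer_instance

-- ===== CLAIM (what is proved, stated in full; the proofs are below) =====
def Claim_equal_solve : Prop := ∀ (s : String) (k : Int), Dom_solve s k → Pre_solve s k → Spec_solve s k (solve s k)

-- ===== LEMMAS AND PROOFS =====

-- 'l contains m pairwise-disjoint, left-to-right occurrences of p'
def HasOccs (p : List Char) : Nat → List Char → Prop
  | 0, _ => True
  | m + 1, l => ∃ a rest, l = a ++ p ++ rest ∧ HasOccs p m rest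

theorem hasOccs_append {p : List Char} {m : Nat} {rest : List Char} (x : List Char)
    (h : HasOccs p m rest) : HasOccs p m (x ++ rest) := by
  cases m with
  | zero => trivial
  | succ m =>
    obtain ⟨a, r, rfl, hr⟩ := h
    exact ⟨x ++ a, r, by simp, hr⟩

-- B's greedy walk produces that many disjoint occurrences …
theorem countGo_sound (p : List Char) : ∀ (fuel : Nat) (l : List Char),
    HasOccs p (countGo p fuel l) l := by
  intro fuel
  induction fuel with
  | zero => intro l; exact trivial
  | succ fuel ih =>
    intro l
    cases l with
    | nil => exact trivial
    | cons c rest =>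
      by_cases hp : PySem.Chars.startswith (c :: rest) p
      · rw [countGo, if_pos hp]
        obtain ⟨t, ht⟩ := (by simpa [PySem.Chars.startswith] using hp : p <+: c :: rest)
        rw [Nat.add_comm]
        refine ⟨[], List.drop p.length (c :: rest), ?_, ih _⟩
        have hd : List.drop p.length (c :: rest) = t := by
          rw [← ht]; simp
        rw [hd, List.nil_append, ht]
      · rw [countGo, if_neg hp]
        exact hasOccs_append [c] (ih rest)

theorem hasOccs_of_prefix {p q : List Char} (hpq : p <+: q) :
    ∀ {m : Nat} {l : List Char}, HasOccs q m l → HasOccs p m l := by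
  intro m
  induction m with
  | zero => intro l _; trivial
  | succ m ih =>
    intro l h
    obtain ⟨a, r, rfl, hr⟩ := h
    obtain ⟨t, rfl⟩ := hpq
    exact ⟨a, t ++ r, by simp, hasOccs_append t (ih hr)⟩

-- … and is maximal: no family of disjoint occurrences beats the greedy count
theorem countGo_complete {p : List Char} (hp : p ≠ []) : ∀ (fuel : Nat) (l : List Char) (m : Nat),
    l.length ≤ fuel → HasOccs p m l → m ≤ countGo p fuel l := by
  intro fuel
  induction fuel with
  | zero =>
    intro l m hlen h
    cases m with
    | zero => simp
    | succ m =>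
      obtain ⟨a, r, heq, _⟩ := h
      have : l = [] := List.eq_nil_of_length_eq_zero (Nat.le_zero.mp hlen)
      subst this
      simp at heq
      exact absurd heq.2.1 hp
  | succ fuel ih =>
    intro l m hlen h
    cases l with
    | nil =>
      cases m with
      | zero => simp
      | succ m =>
        obtain ⟨a, r, heq, _⟩ := h
        simp at heq
        exact absurd heq.2.1 hp
    | cons c rest =>
      cases m with
      | zero => simp
      | succ m =>
        obtain ⟨a, r, heq, hr⟩ := h
        by_cases hpre : PySem.Chars.startswith (c :: rest) p
        · rw [countGo, if_pos hpre]
          have hsub : m ≤ countGo p fuel (List.drop p.length (c :: rest)) := by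
            apply ih
            · simp at hlen ⊢
              have : 1 ≤ p.length := by cases p with | nil => exact absurd rfl hp | cons x xs => simp
              omega
            · -- occurrences after the first survive dropping |p| chars
              have hlp : p.length ≤ (a ++ p).length := by simp
              have hdrop : List.drop p.length (c :: rest) = List.drop p.length (a ++ p) ++ r := by
                rw [heq, List.drop_append_of_le_length hlp]
              rw [hdrop]
              exact hasOccs_append _ hr
          omega
        · rw [countGo, if_neg hpre]
          apply ih
          · simpa using Nat.le_of_succ_le_succ (by simpa using hlen)
          · cases a with
            | nil =>
              exfalso
              apply hpre
              simp only [PySem.Chars.startswith, List.isPrefixOf_iff_prefix]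
              exact ⟨r, by simpa using heq.symm⟩
            | cons x a' =>
              have : rest = a' ++ p ++ r := by
                have := (by simpa using heq : c = x ∧ rest = a' ++ (p ++ r))
                simpa [List.append_assoc] using this.2
              exact ⟨a', r, this, hr⟩

theorem countGo_mono {p q : List Char} (hp : p ≠ []) (hpq : p <+: q)
    {fuel : Nat} {l : List Char} (hf : l.length ≤ fuel) :
    countGo q fuel l ≤ countGo p fuel l :=
  countGo_complete hp fuel l _ hf (hasOccs_of_prefix hpq (countGo_sound q fuel l))

-- A's split produces one part per greedy occurrence, plus one
theorem splitOn_go_length (p : List Char) : ∀ (fuel : Nat) (l cur : List Char) (acc : List (List Char)),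
    (PySem.Chars.splitOn.go p fuel l cur acc).length = acc.length + 1 + countGo p fuel l := by
  intro fuel
  induction fuel with
  | zero => intro l cur acc; simp [PySem.Chars.splitOn.go, countGo]
  | succ fuel ih =>
    intro l cur acc
    cases l with
    | nil => simp [PySem.Chars.splitOn.go, countGo]
    | cons c rest =>
      rw [PySem.Chars.splitOn.go]
      by_cases hp : p.isPrefixOf (c :: rest)
      · rw [if_pos hp, ih, countGo, if_pos (by simpa [PySem.Chars.startswith] using hp)]
        simp; omega
      · rw [if_neg hp, ih, countGo, if_neg (by simpa [PySem.Chars.startswith] using hp)]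

theorem checkA_eq_checkB {s : String} {k mid : Int} (hs : s.toList ≠ []) (hmid : 1 ≤ mid) :
    checkA s k mid = checkB s k mid.toNat := by
  have hpre : (PySem.Str.slice s none (some mid)).toList = s.toList.take mid.toNat := by
    simp [PySem.Str.slice, PySem.List.slice_to _ (by omega : (0:Int) ≤ mid)]
  have hne : s.toList.take mid.toNat ≠ [] := by
    intro h
    rcases List.take_eq_nil_iff.mp h with h | h
    · omega
    · exact hs h
  rw [checkA, checkB]
  rw [PySem.Str.split?, PySem.Chars.split?, hpre, if_neg (by simpa using hne)]
  simp only [Option.map_some, Option.getD_some, List.length_map]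
  rw [PySem.Chars.splitOn, splitOn_go_length]
  simp only [List.length_nil]
  simp only [decide_eq_decide]
  push_cast
  omega

theorem checkB_mono {s : String} {k : Int} {a b : Nat} (hs : s.toList ≠ [])
    (ha : 1 ≤ a) (hab : a ≤ b) (hb : checkB s k b = true) : checkB s k a = true := by
  rw [checkB, decide_eq_true_iff] at hb ⊢
  have hne : s.toList.take a ≠ [] := by
    intro h
    rcases List.take_eq_nil_iff.mp h with h | h
    · omega
    · exact hs h
  have hmono := countGo_mono hne (List.take_prefix_take_left hab)
    (by simp : s.toList.length ≤ s.toList.length + 1)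
  calc (k : Int) ≤ _ := hb
    _ ≤ _ := by exact_mod_cast hmono

-- B's downward scan returns r iff the check holds up to r and fails above it
theorem scanGo_eq {s : String} {k : Int} : ∀ (m : Nat) (r : Int), 0 ≤ r → r ≤ (m : Int) →
    (∀ j : Nat, 1 ≤ j → (j : Int) ≤ r → checkB s k j = true) →
    (∀ j : Nat, r < (j : Int) → j ≤ m → checkB s k j = false) →
    scanGo s k m = r := by
  intro m
  induction m with
  | zero => intro r h0 h1 _ _; rw [scanGo]; omega
  | succ m ih =>
    intro r h0 h1 hlow hhigh
    rw [scanGo]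
    by_cases hc : checkB s k (m + 1) = true
    · rw [if_pos hc]
      by_cases hr : r < ((m + 1 : Nat) : Int)
      · rw [hhigh (m + 1) hr le_rfl] at hc
        exact absurd hc (by simp)
      · push_cast at hr ⊢; omega
    · rw [if_neg hc]
      have hrm : r ≤ (m : Int) := by
        by_contra hgt
        exact hc (hlow (m + 1) (by omega) (by push_cast; omega))
      exact ih r h0 hrm hlow (fun j hj1 hj2 => hhigh j hj1 (by omega))

theorem checkA_mono {s : String} {k : Int} {a b : Int} (hs : s.toList ≠ [])
    (ha : 1 ≤ a) (hab : a ≤ b) (hb : checkA s k b = true) : checkA s k a = true := by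
  rw [checkA_eq_checkB hs ha]
  rw [checkA_eq_checkB hs (le_trans ha hab)] at hb
  exact checkB_mono hs (by omega) (by omega) hb

theorem checkA_natCast {s : String} {k : Int} {j : Nat} (hs : s.toList ≠ []) (hj : 1 ≤ j) :
    checkA s k (j : Int) = checkB s k j := by
  rw [checkA_eq_checkB hs (by exact_mod_cast hj), Int.toNat_natCast]

-- invariant of A's binary search: everything ≤ left-1 passes, everything ≥ right+1 fails
theorem solveGo_eq {s : String} {k : Int} (hs : s.toList ≠ []) :
    ∀ (d : Nat) (l r : Int), (r + 1 - l).toNat ≤ d → 1 ≤ l → r ≤ (s.toList.length : Int) + 5 → l ≤ r + 1 →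
    (∀ j : Int, 1 ≤ j → j ≤ l - 1 → checkA s k j = true) →
    (∀ j : Int, r + 1 ≤ j → j ≤ (s.toList.length : Int) + 5 → checkA s k j = false) →
    solveGo s k l r = scanGo s k (s.toList.length + 5) := by
  intro d
  induction d with
  | zero =>
    intro l r hd hl hr hlr hlow hhigh
    have hlr' : ¬ l ≤ r := by omega
    rw [solveGo, dif_neg hlr']
    refine (scanGo_eq (s.toList.length + 5) r (by omega) (by push_cast; omega) ?_ ?_).symm
    · intro j hj1 hj2
      rw [← checkA_natCast hs hj1]
      exact hlow (j : Int) (by exact_mod_cast hj1) (by omega)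
    · intro j hj1 hj2
      rw [← checkA_natCast hs (by omega)]
      exact hhigh (j : Int) (by omega) (by omega)
  | succ d ih =>
    intro l r hd hl hr hlr hlow hhigh
    by_cases hle : l ≤ r
    · rw [solveGo, dif_pos hle]
      have hmid := PySem.Int.floordiv_two_mid_bounds hle
      set mid := PySem.Int.floordiv (l + r) 2 with hmiddef
      by_cases hc : checkA s k mid = true
      · rw [if_pos hc]
        apply ih (mid + 1) r (by omega) (by omega) hr (by omega)
        · intro j hj1 hj2
          by_cases hjl : j ≤ l - 1
          · exact hlow j hj1 hjl
          · exact checkA_mono hs hj1 (by omega) hc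
        · exact hhigh
      · rw [if_neg hc]
        apply ih l (mid - 1) (by omega) hl (by omega) (by omega) hlow
        intro j hj1 hj2
        by_cases hjr : r + 1 ≤ j
        · exact hhigh j hjr hj2
        · by_contra hne
          have : checkA s k j = true := by
            cases h : checkA s k j
            · exact absurd h hne
            · rfl
          exact hc (checkA_mono hs (by omega) (by omega) this)
    · rw [solveGo, dif_neg hle]
      refine (scanGo_eq (s.toList.length + 5) r (by omega) (by push_cast; omega) ?_ ?_).symm
      · intro j hj1 hj2
        rw [← checkA_natCast hs hj1]
        exact hlow (j : Int) (by exact_mod_cast hj1) (by omega)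
      · intro j hj1 hj2
        rw [← checkA_natCast hs (by omega)]
        exact hhigh (j : Int) (by omega) (by omega)

-- ===== VERDICT (by name: the statement is the Claim_ definition above) =====
theorem solve_spec : Claim_equal_solve := by
  intro s k _ hpre
  unfold Spec_solve solve solve_alt
  rw [PySem.Str.len_eq]
  exact solveGo_eq hpre ((s.toList.length : Int) + 5 + 1 - 1).toNat 1 _ le_rfl le_rfl le_rfl
    (by omega) (fun j h1 h2 => absurd (h1.trans h2) (by omega))
    (fun j h1 h2 => absurd (h1.trans h2) (by omega))
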